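-- pv_equiv track=rewrite | github.com/Hyungeol94/Software_Competency_Practice | 2025/20250307/소스2.py | solution
-- ===== SOURCE A (Python) =====
-- def solution(n, tops):
--     dp = [0] * (2*n+1)
--     dp[2*n] = 1
--     dp[2*n-1] = 2 if tops[(2*n-1)//2] == 0 else 3
--     for i in range(2*n-2,-1,-1):
--         if i % 2 == 0:
--             dp[i] = (dp[i+1] + dp[i+2]) % 10007
--         else:
--             dp[i] = (dp[i+1] + dp[i+2]) % 10007
--             dp[i] =  (dp[i+1] + dp[i+2]) if tops[i // 2] == 0 else (dp[i+1]*2 + dp[i+2]) % 10007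
--
--     return dp[0] % 10007
-- ===== SOURCE B (Python) =====
-- def solution(n, tops):
--     # Divide-and-conquer product of per-column 2x2 transfer matrices (mod 10007),
--     # applied to the boundary vector, instead of a backward dp-array fill.
--     p = 10007
--     if n == 0:
--         return 1
--
--     def mat(t):
--         # column with flag t maps state (e, o) to (e + o, c*e + (c+1)*o)
--         c = 2 if t else 1
--         return (1, 1, c, c + 1)
--
--     def mul(A, B):
--         a, b, c, d = A
--         e, f, g, h = B
--         return ((a*e + b*g) % p, (a*f + b*h) % p,
--                 (c*e + d*g) % p, (c*f + d*h) % p)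
--
--     def prod(lo, hi):
--         if hi - lo == 1:
--             return mat(tops[lo])
--         mid = (lo + hi) // 2
--         return mul(prod(lo, mid), prod(mid, hi))
--
--     m = n - 1
--     e, o = 1, (3 if tops[m] else 2)
--     if m == 0:
--         return (e + o) % p
--     a, b, c, d = prod(0, m)
--     return ((a*e + b*o) + (c*e + d*o)) % p
-- ===== Notes on version B (the rewrite author's own statement) =====
-- stated objective: alternative
-- what changed: B replaces A's backward fill of a (2n+1)-cell dp array with an i%2 parity branch by a divide-and-conquer product of per-column 2x2 transfer matrices mod 10007, applied to the boundary vector.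
-- intended difference: On n = 0 with nonempty tops, A's negative-index wraparound (dp[-1], tops[-1]) overwrites dp[0] and returns 2 or 3, while B returns 1, the intended count of tilings of an empty board. — e.g. on solution(0, [5]): A returns 3, B returns 1
import Mathlib
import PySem

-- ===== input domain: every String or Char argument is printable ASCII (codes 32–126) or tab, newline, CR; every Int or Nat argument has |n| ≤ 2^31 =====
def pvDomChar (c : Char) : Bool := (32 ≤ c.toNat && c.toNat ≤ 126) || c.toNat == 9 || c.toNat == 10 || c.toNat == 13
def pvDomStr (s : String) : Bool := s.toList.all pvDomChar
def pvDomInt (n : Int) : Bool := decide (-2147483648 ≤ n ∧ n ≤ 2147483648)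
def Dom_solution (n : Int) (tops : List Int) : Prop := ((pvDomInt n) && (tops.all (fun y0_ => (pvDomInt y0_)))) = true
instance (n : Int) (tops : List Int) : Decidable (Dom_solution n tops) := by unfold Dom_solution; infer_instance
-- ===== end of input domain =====

-- B replaces A's backward fill of a (2n+1)-cell dp array by a divide-and-conquer
-- product of per-column 2x2 transfer matrices (mod 10007) applied to the boundary
-- vector; objective: alternative.

-- ===== PORT A =====
-- Python list assignment `xs[i] = v` (negative-index wraparound); exact on every
-- index Python accepts; where Python would raise IndexError the list is returned
-- unchanged — such inputs are excluded by Pre_solution.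
def pySet (xs : List Int) (i : Int) (v : Int) : List Int :=
  let j : Int := if i < 0 then i + xs.length else i
  if 0 ≤ j ∧ j < xs.length then xs.set j.toNat v else xs

-- body of A's `for i in range(2*n-2, -1, -1)` loop
def solutionStep (tops : List Int) (dp : List Int) (i : Int) : List Int :=
  if PySem.Int.mod i 2 = 0 then
    pySet dp i (PySem.Int.mod (PySem.List.pyGetD dp (i+1) 0 + PySem.List.pyGetD dp (i+2) 0) 10007)
  else
    let dp := pySet dp i (PySem.Int.mod (PySem.List.pyGetD dp (i+1) 0 + PySem.List.pyGetD dp (i+2) 0) 10007)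
    pySet dp i (if PySem.List.pyGetD tops (PySem.Int.floordiv i 2) 0 = 0
                then PySem.List.pyGetD dp (i+1) 0 + PySem.List.pyGetD dp (i+2) 0
                else PySem.Int.mod (PySem.List.pyGetD dp (i+1) 0 * 2 + PySem.List.pyGetD dp (i+2) 0) 10007)

def solution (n : Int) (tops : List Int) : Int :=
  let dp := List.replicate (2*n+1).toNat 0
  let dp := pySet dp (2*n) 1
  let dp := pySet dp (2*n-1)
      (if PySem.List.pyGetD tops (PySem.Int.floordiv (2*n-1) 2) 0 = 0 then 2 else 3)
  let dp := (PySem.List.pyRange (2*n-2) (-1) (-1)).foldl (solutionStep tops) dp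
  PySem.Int.mod (PySem.List.pyGetD dp 0 0) 10007

-- ===== PORT B =====
-- Source B's mat(t): transfer matrix (a, b, c, d) of one column
def matT (t : Int) : Int × Int × Int × Int :=
  let c : Int := if t ≠ 0 then 2 else 1
  (1, 1, c, c + 1)

-- Source B's mul(A, B): 2x2 matrix product mod 10007
def matMul (A B : Int × Int × Int × Int) : Int × Int × Int × Int :=
  (PySem.Int.mod (A.1 * B.1 + A.2.1 * B.2.2.1) 10007,
   PySem.Int.mod (A.1 * B.2.1 + A.2.1 * B.2.2.2) 10007,
   PySem.Int.mod (A.2.2.1 * B.1 + A.2.2.2 * B.2.2.1) 10007,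
   PySem.Int.mod (A.2.2.1 * B.2.1 + A.2.2.2 * B.2.2.2) 10007)

-- Source B's prod(lo, hi).  Totality guard: the base test is `hi - lo ≤ 1` where
-- Python tests `hi - lo == 1`; on every call B makes the invariant 1 ≤ hi - lo
-- holds, so the two coincide there (for hi - lo < 1 Python would not terminate).
def matProd (tops : List Int) (lo hi : Int) : Int × Int × Int × Int :=
  if hi - lo ≤ 1 then matT (PySem.List.pyGetD tops lo 0)
  else
    matMul (matProd tops lo (PySem.Int.floordiv (lo + hi) 2))
           (matProd tops (PySem.Int.floordiv (lo + hi) 2) hi)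
termination_by (hi - lo).toNat
decreasing_by
  all_goals
    rw [PySem.Int.floordiv_eq_ediv_of_pos (by norm_num)]
    omega

def solution_alt (n : Int) (tops : List Int) : Int :=
  if n = 0 then 1
  else
    let m := n - 1
    let e : Int := 1
    let o : Int := if PySem.List.pyGetD tops m 0 ≠ 0 then 3 else 2
    if m = 0 then PySem.Int.mod (e + o) 10007
    else
      let M := matProd tops 0 m
      PySem.Int.mod ((M.1 * e + M.2.1 * o) + (M.2.2.1 * e + M.2.2.2 * o)) 10007

-- ===== PRECONDITION & SPEC =====
-- Python A raises IndexError when n < 0, when n = 0 with tops empty, or when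
-- tops has fewer than n entries; exactly those inputs are excluded.
def Pre_solution (n : Int) (tops : List Int) : Prop :=
  (1 ≤ n ∧ n ≤ (tops.length : Int)) ∨ (n = 0 ∧ tops ≠ [])
instance (n : Int) (tops : List Int) : Decidable (Pre_solution n tops) := by unfold Pre_solution; infer_instance
def pvWitness_solution : Int × List Int := (2, [0, 1])

-- On n = 0 (with nonempty tops; with empty tops A raises and Pre_ excludes it)
-- A's negative-index wraparound overwrites dp[0] and it returns 2 or 3 (read from
-- tops[-1]), while B returns 1, the intended count of tilings of an empty board.
def D_solution (n : Int) (tops : List Int) : Prop := n = 0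
instance (n : Int) (tops : List Int) : Decidable (D_solution n tops) := by unfold D_solution; infer_instance

def Spec_solution (n : Int) (tops : List Int) (out : Int) : Prop := ¬ D_solution n tops → out = solution_alt n tops
instance (n : Int) (tops : List Int) (out : Int) : Decidable (Spec_solution n tops out) := by unfold Spec_solution; infer_instance

def pvDiffWitness_solution : Int × List Int := (0, [5])
def pvDiffWitnessOut_solution : Int × Int := (3, 1)

-- ===== CLAIM (what is proved, stated in full; the proofs are below) =====
def Claim_unchanged_solution : Prop := ∀ (n : Int) (tops : List Int), Dom_solution n tops → Pre_solution n tops → Spec_solution n tops (solution n tops)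
def Claim_changed_solution : Prop := Dom_solution (pvDiffWitness_solution.1) (pvDiffWitness_solution.2) ∧ Pre_solution (pvDiffWitness_solution.1) (pvDiffWitness_solution.2) ∧ D_solution (pvDiffWitness_solution.1) (pvDiffWitness_solution.2) ∧ solution (pvDiffWitness_solution.1) (pvDiffWitness_solution.2) = pvDiffWitnessOut_solution.1 ∧ solution_alt (pvDiffWitness_solution.1) (pvDiffWitness_solution.2) = pvDiffWitnessOut_solution.2 ∧ pvDiffWitnessOut_solution.1 ≠ pvDiffWitnessOut_solution.2
def Claim_exact_solution : Prop := ∀ (n : Int) (tops : List Int), Dom_solution n tops → Pre_solution n tops → D_solution n tops → solution n tops ≠ solution_alt n tops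

-- ===== LEMMAS AND PROOFS =====

-- scalar model of A's loop: fuel k ↔ indices 2k,…,0 still to process,
-- state (e, o) = (dp[2k+2], dp[2k+1])
def aRun (tops : List Int) (e o : Int) : Nat → Int
  | 0 => PySem.Int.mod (o + e) 10007
  | k+1 =>
      aRun tops (PySem.Int.mod (o + e) 10007)
        (if PySem.List.pyGetD tops (k : Int) 0 = 0
         then PySem.Int.mod (o + e) 10007 + o
         else PySem.Int.mod (PySem.Int.mod (o + e) 10007 * 2 + o) 10007) k

-- one column of A's backward dynamics on the scalar pair (e, o)
def colStep (t : Int) (s : Int × Int) : Int × Int :=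
  let e1 := PySem.Int.mod (s.2 + s.1) 10007
  (e1, if t = 0 then e1 + s.2 else PySem.Int.mod (e1 * 2 + s.2) 10007)

-- backward dynamics over the column segment [lo, lo+k), highest column first
def segRun (tops : List Int) (lo : Int) : Nat → (Int × Int) → Int × Int
  | 0, s => s
  | k+1, s => segRun tops lo k (colStep (PySem.List.pyGetD tops (lo + (k : Int)) 0) s)

-- the action of a matrix on the state vector (exact, no mod)
def matApp (M : Int × Int × Int × Int) (s : Int × Int) : Int × Int :=
  (M.1 * s.1 + M.2.1 * s.2, M.2.2.1 * s.1 + M.2.2.2 * s.2)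

theorem length_pySet (xs : List Int) (i v : Int) : (pySet xs i v).length = xs.length := by
  unfold pySet; dsimp only; split_ifs <;> simp

theorem pyGetD_pySet_self (xs : List Int) (i v d : Int)
    (h0 : 0 ≤ i) (h1 : i < (xs.length : Int)) :
    PySem.List.pyGetD (pySet xs i v) i d = v := by
  unfold pySet
  rw [PySem.List.pyGetD_of_nonneg _ _ h0]
  dsimp only
  rw [if_neg (by omega : ¬ i < 0), if_pos ⟨h0, h1⟩]
  rw [List.getD_eq_getElem?_getD, List.getElem?_set_self (by omega), Option.getD_some]

theorem pyGetD_pySet_ne (xs : List Int) (i k v d : Int)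
    (h0 : 0 ≤ i) (hk : 0 ≤ k) (hne : i ≠ k) :
    PySem.List.pyGetD (pySet xs i v) k d = PySem.List.pyGetD xs k d := by
  unfold pySet
  dsimp only
  rw [if_neg (by omega : ¬ i < 0)]
  split_ifs with h
  · rw [PySem.List.pyGetD_of_nonneg _ _ hk, PySem.List.pyGetD_of_nonneg _ _ hk]
    rw [List.getD_eq_getElem?_getD, List.getD_eq_getElem?_getD, List.getElem?_set_ne (by omega)]
  · rfl

theorem aLoop (tops : List Int) (k : Nat) : ∀ (L : List Int), 2*k+3 ≤ L.length →
    PySem.List.pyGetD ((PySem.List.pyRange (2*(k:Int)) (-1) (-1)).foldl (solutionStep tops) L) 0 0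
      = aRun tops (PySem.List.pyGetD L (2*(k:Int)+2) 0) (PySem.List.pyGetD L (2*(k:Int)+1) 0) k := by
  induction k with
  | zero =>
      intro L hL
      rw [show (2*((0:Nat):Int)) = 0 by norm_num]
      rw [PySem.List.pyRange_neg_one_cons (by norm_num), PySem.List.pyRange_neg_one_eq_nil (by norm_num)]
      simp only [List.foldl_cons, List.foldl_nil, solutionStep]
      rw [if_pos (by decide : PySem.Int.mod 0 2 = 0)]
      rw [pyGetD_pySet_self _ _ _ _ (le_refl 0) (by omega)]
      simp only [aRun]
  | succ k ih =>
      intro L hL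
      have hcast : (2*(((k+1):Nat):Int)) = 2*(k:Int)+2 := by push_cast; ring
      rw [hcast]
      rw [PySem.List.pyRange_neg_one_cons (by omega),
          show (2*(k:Int)+2-1) = 2*(k:Int)+1 by ring,
          PySem.List.pyRange_neg_one_cons (by omega),
          show (2*(k:Int)+1-1) = 2*(k:Int) by ring]
      simp only [List.foldl_cons]
      have hme : PySem.Int.mod (2*(k:Int)+2) 2 = 0 := by
        rw [PySem.Int.mod_eq_emod_of_pos (by norm_num)]; omega
      have hmo : ¬ PySem.Int.mod (2*(k:Int)+1) 2 = 0 := by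
        rw [PySem.Int.mod_eq_emod_of_pos (by norm_num)]; omega
      have hfd : PySem.Int.floordiv (2*(k:Int)+1) 2 = (k:Int) := by
        rw [PySem.Int.floordiv_eq_iff_of_pos (by norm_num)]; omega
      have hL' : (2*(k:Int)+2) < ((L.length : Int)) := by omega
      -- first step (even index 2k+2)
      have h1 : solutionStep tops L (2*(k:Int)+2)
          = pySet L (2*(k:Int)+2)
              (PySem.Int.mod (PySem.List.pyGetD L (2*(k:Int)+2+1) 0 + PySem.List.pyGetD L (2*(k:Int)+2+2) 0) 10007) := by
        simp only [solutionStep]; rw [if_pos hme]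
      rw [h1]
      set e' := PySem.Int.mod (PySem.List.pyGetD L (2*(k:Int)+2+1) 0 + PySem.List.pyGetD L (2*(k:Int)+2+2) 0) 10007 with he'
      set L1 := pySet L (2*(k:Int)+2) e' with hL1
      -- second step (odd index 2k+1)
      have h2 : solutionStep tops L1 (2*(k:Int)+1)
          = pySet (pySet L1 (2*(k:Int)+1)
              (PySem.Int.mod (PySem.List.pyGetD L1 (2*(k:Int)+1+1) 0 + PySem.List.pyGetD L1 (2*(k:Int)+1+2) 0) 10007))
              (2*(k:Int)+1)
              (if PySem.List.pyGetD tops (k:Int) 0 = 0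
               then PySem.List.pyGetD (pySet L1 (2*(k:Int)+1)
                      (PySem.Int.mod (PySem.List.pyGetD L1 (2*(k:Int)+1+1) 0 + PySem.List.pyGetD L1 (2*(k:Int)+1+2) 0) 10007)) (2*(k:Int)+1+1) 0
                    + PySem.List.pyGetD (pySet L1 (2*(k:Int)+1)
                      (PySem.Int.mod (PySem.List.pyGetD L1 (2*(k:Int)+1+1) 0 + PySem.List.pyGetD L1 (2*(k:Int)+1+2) 0) 10007)) (2*(k:Int)+1+2) 0
               else PySem.Int.mod
                    (PySem.List.pyGetD (pySet L1 (2*(k:Int)+1)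
                      (PySem.Int.mod (PySem.List.pyGetD L1 (2*(k:Int)+1+1) 0 + PySem.List.pyGetD L1 (2*(k:Int)+1+2) 0) 10007)) (2*(k:Int)+1+1) 0 * 2
                    + PySem.List.pyGetD (pySet L1 (2*(k:Int)+1)
                      (PySem.Int.mod (PySem.List.pyGetD L1 (2*(k:Int)+1+1) 0 + PySem.List.pyGetD L1 (2*(k:Int)+1+2) 0) 10007)) (2*(k:Int)+1+2) 0) 10007) := by
        simp only [solutionStep]; rw [if_neg hmo, hfd]
      rw [h2]
      -- simplify the reads in the second step
      have r1 : ∀ w : Int, PySem.List.pyGetD (pySet L1 (2*(k:Int)+1) w) (2*(k:Int)+1+1) 0 = e' := by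
        intro w
        rw [pyGetD_pySet_ne _ _ _ _ _ (by omega) (by omega) (by omega)]
        rw [show (2*(k:Int)+1+1) = 2*(k:Int)+2 by ring, hL1]
        rw [pyGetD_pySet_self _ _ _ _ (by omega) hL']
      have r2 : ∀ w : Int, PySem.List.pyGetD (pySet L1 (2*(k:Int)+1) w) (2*(k:Int)+1+2) 0
          = PySem.List.pyGetD L (2*(k:Int)+1+2) 0 := by
        intro w
        rw [pyGetD_pySet_ne _ _ _ _ _ (by omega) (by omega) (by omega), hL1]
        rw [pyGetD_pySet_ne _ _ _ _ _ (by omega) (by omega) (by omega)]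
      rw [r1, r2]
      set o' := (if PySem.List.pyGetD tops (k:Int) 0 = 0
                 then e' + PySem.List.pyGetD L (2*(k:Int)+1+2) 0
                 else PySem.Int.mod (e' * 2 + PySem.List.pyGetD L (2*(k:Int)+1+2) 0) 10007) with ho'
      -- apply the induction hypothesis to the updated list
      rw [ih _ (by simp only [length_pySet, hL1]; omega)]
      have gg1 : ∀ w1 w2 : Int,
          PySem.List.pyGetD (pySet (pySet L1 (2*(k:Int)+1) w1) (2*(k:Int)+1) w2) (2*(k:Int)+2) 0 = e' := by
        intro w1 w2
        rw [pyGetD_pySet_ne _ _ _ _ _ (by omega) (by omega) (by omega),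
            pyGetD_pySet_ne _ _ _ _ _ (by omega) (by omega) (by omega), hL1,
            pyGetD_pySet_self _ _ _ _ (by omega) hL']
      have gg2 : ∀ w1 w2 : Int,
          PySem.List.pyGetD (pySet (pySet L1 (2*(k:Int)+1) w1) (2*(k:Int)+1) w2) (2*(k:Int)+1) 0 = w2 := by
        intro w1 w2
        refine pyGetD_pySet_self _ _ _ _ (by omega) ?_
        rw [length_pySet, hL1, length_pySet]
        omega
      rw [gg1, gg2]
      simp only [aRun]
      rw [← he']
      rw [show (2*(k:Int)+1+2) = 2*(k:Int)+2+1 by ring] at ho'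
      rw [← ho']

-- aRun is segRun (from column 0) followed by the final mod of the sum
theorem aRun_segRun (tops : List Int) (k : Nat) : ∀ e o : Int,
    aRun tops e o k
      = PySem.Int.mod ((segRun tops 0 k (e, o)).2 + (segRun tops 0 k (e, o)).1) 10007 := by
  induction k with
  | zero => intro e o; simp only [aRun, segRun]
  | succ k ih =>
      intro e o
      simp only [aRun, segRun, colStep]
      rw [ih]
      norm_num

-- splitting a segment run
theorem segRun_add (tops : List Int) (lo : Int) (a b : Nat) : ∀ s : Int × Int,
    segRun tops lo (a + b) s = segRun tops lo a (segRun tops (lo + (a : Int)) b s) := by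
  induction b with
  | zero => intro s; simp only [Nat.add_zero, segRun]
  | succ b ih =>
      intro s
      rw [show a + (b + 1) = (a + b) + 1 by omega]
      simp only [segRun]
      rw [ih]
      congr 2
      push_cast
      ring

-- the matrix product computes the segment dynamics, up to congruence mod 10007
theorem matProd_segRun (tops : List Int) (k : Nat) : ∀ (lo hi : Int), (hi - lo).toNat = k →
    1 ≤ hi - lo → ∀ s : Int × Int,
    (matApp (matProd tops lo hi) s).1 ≡ (segRun tops lo (hi - lo).toNat s).1 [ZMOD 10007] ∧
    (matApp (matProd tops lo hi) s).2 ≡ (segRun tops lo (hi - lo).toNat s).2 [ZMOD 10007] := by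
  induction k using Nat.strong_induction_on with
  | _ k ih =>
      intro lo hi hk h1 s
      have hp : (0:Int) < 10007 := by norm_num
      by_cases hle : hi - lo ≤ 1
      · -- base: one column
        have hk1 : (hi - lo).toNat = 1 := by omega
        rw [matProd, if_pos hle, hk1]
        simp only [segRun, colStep, matApp, matT, Nat.cast_zero, add_zero]
        have hm : PySem.Int.mod (s.2 + s.1) 10007 = (s.2 + s.1) % 10007 :=
          PySem.Int.mod_eq_emod_of_pos hp
        have hmm : (s.2 + s.1) % 10007 ≡ s.2 + s.1 [ZMOD 10007] := Int.emod_emod_of_dvd _ dvd_rfl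
        by_cases ht : PySem.List.pyGetD tops lo 0 = 0
        · rw [if_neg (fun h => h ht), if_pos ht]
          constructor
          · rw [hm]; calc (1:Int) * s.1 + 1 * s.2 = s.2 + s.1 := by ring
              _ ≡ (s.2 + s.1) % 10007 [ZMOD 10007] := hmm.symm
          · rw [hm]
            calc (1:Int) * s.1 + (1 + 1) * s.2 = (s.2 + s.1) + s.2 := by ring
              _ ≡ (s.2 + s.1) % 10007 + s.2 [ZMOD 10007] := Int.ModEq.add_right _ hmm.symm
        · rw [if_pos ht, if_neg ht]
          constructor
          · rw [hm]; calc (1:Int) * s.1 + 1 * s.2 = s.2 + s.1 := by ring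
              _ ≡ (s.2 + s.1) % 10007 [ZMOD 10007] := hmm.symm
          · rw [hm, PySem.Int.mod_eq_emod_of_pos hp]
            calc (2:Int) * s.1 + (2 + 1) * s.2 = (s.2 + s.1) * 2 + s.2 := by ring
              _ ≡ (s.2 + s.1) % 10007 * 2 + s.2 [ZMOD 10007] :=
                  Int.ModEq.add_right _ (Int.ModEq.mul_right _ hmm.symm)
              _ ≡ ((s.2 + s.1) % 10007 * 2 + s.2) % 10007 [ZMOD 10007] :=
                  (Int.emod_emod_of_dvd _ dvd_rfl).symm
      · -- split at the midpoint
        rw [matProd, if_neg hle]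
        set mid := PySem.Int.floordiv (lo + hi) 2 with hmid
        have hmid' : mid = (lo + hi) / 2 := PySem.Int.floordiv_eq_ediv_of_pos (by norm_num)
        have hb1 : 1 ≤ mid - lo := by omega
        have hb2 : 1 ≤ hi - mid := by omega
        have hs1 : (mid - lo).toNat < k := by omega
        have hs2 : (hi - mid).toNat < k := by omega
        -- segment split
        have hsplit : (hi - lo).toNat = (mid - lo).toNat + (hi - mid).toNat := by omega
        have hmidc : lo + (((mid - lo).toNat : Nat) : Int) = mid := by omega
        have hseg : ∀ s0 : Int × Int, segRun tops lo (hi - lo).toNat s0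
            = segRun tops lo (mid - lo).toNat (segRun tops mid (hi - mid).toNat s0) := by
          intro s0
          rw [hsplit, segRun_add, hmidc]
        rw [hseg]
        set A := matProd tops lo mid
        set B := matProd tops mid hi
        -- applying matMul A B ≡ applying A after B, componentwise
        have happ : (matApp (matMul A B) s).1 ≡ (matApp A (matApp B s)).1 [ZMOD 10007] ∧
                    (matApp (matMul A B) s).2 ≡ (matApp A (matApp B s)).2 [ZMOD 10007] := by
          simp only [matApp, matMul, PySem.Int.mod_eq_emod_of_pos hp]
          constructor
          · calc (A.1*B.1 + A.2.1*B.2.2.1) % 10007 * s.1 + (A.1*B.2.1 + A.2.1*B.2.2.2) % 10007 * s.2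
                ≡ (A.1*B.1 + A.2.1*B.2.2.1) * s.1 + (A.1*B.2.1 + A.2.1*B.2.2.2) * s.2 [ZMOD 10007] :=
                  Int.ModEq.add (Int.ModEq.mul_right _ (Int.emod_emod_of_dvd _ dvd_rfl))
                    (Int.ModEq.mul_right _ (Int.emod_emod_of_dvd _ dvd_rfl))
              _ = A.1 * (B.1 * s.1 + B.2.1 * s.2) + A.2.1 * (B.2.2.1 * s.1 + B.2.2.2 * s.2) := by ring
          · calc (A.2.2.1*B.1 + A.2.2.2*B.2.2.1) % 10007 * s.1 + (A.2.2.1*B.2.1 + A.2.2.2*B.2.2.2) % 10007 * s.2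
                ≡ (A.2.2.1*B.1 + A.2.2.2*B.2.2.1) * s.1 + (A.2.2.1*B.2.1 + A.2.2.2*B.2.2.2) * s.2 [ZMOD 10007] :=
                  Int.ModEq.add (Int.ModEq.mul_right _ (Int.emod_emod_of_dvd _ dvd_rfl))
                    (Int.ModEq.mul_right _ (Int.emod_emod_of_dvd _ dvd_rfl))
              _ = A.2.2.1 * (B.1 * s.1 + B.2.1 * s.2) + A.2.2.2 * (B.2.2.1 * s.1 + B.2.2.2 * s.2) := by ring
        -- matApp is congruence-preserving in the state
        have hcongApp : ∀ (v v' : Int × Int), v.1 ≡ v'.1 [ZMOD 10007] → v.2 ≡ v'.2 [ZMOD 10007] →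
            (matApp A v).1 ≡ (matApp A v').1 [ZMOD 10007] ∧
            (matApp A v).2 ≡ (matApp A v').2 [ZMOD 10007] := by
          intro v v' hv1 hv2
          simp only [matApp]
          exact ⟨Int.ModEq.add (Int.ModEq.mul_left _ hv1) (Int.ModEq.mul_left _ hv2),
                 Int.ModEq.add (Int.ModEq.mul_left _ hv1) (Int.ModEq.mul_left _ hv2)⟩
        have hB := ih _ hs2 mid hi rfl hb2 s
        have hA1 := hcongApp _ _ hB.1 hB.2
        have hA2 := ih _ hs1 lo mid rfl hb1 (segRun tops mid (hi - mid).toNat s)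
        exact ⟨(happ.1.trans hA1.1).trans hA2.1, (happ.2.trans hA1.2).trans hA2.2⟩

-- ===== VERDICT (by name: the statement is the Claim_ definition above) =====
theorem solution_spec : Claim_unchanged_solution := by
  unfold Claim_unchanged_solution Spec_solution
  intro n tops _ hpre hnd
  have hp : (0:Int) < 10007 := by norm_num
  have hpn : 1 ≤ n ∧ n ≤ (tops.length : Int) := by
    unfold Pre_solution at hpre
    unfold D_solution at hnd
    tauto
  obtain ⟨hn1, -⟩ := hpn
  obtain ⟨m, rfl⟩ : ∃ m : Nat, n = (m:Int) + 1 := ⟨(n-1).toNat, by omega⟩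
  -- reduce A to the scalar model
  simp only [solution]
  rw [show (2*((m:Int)+1)) = 2*(m:Int)+2 by ring]
  rw [show (2*(m:Int)+2-1) = 2*(m:Int)+1 by ring, show (2*(m:Int)+2-2) = 2*(m:Int) by ring]
  have hfd : PySem.Int.floordiv (2*(m:Int)+1) 2 = (m:Int) := by
    rw [PySem.Int.floordiv_eq_iff_of_pos (by norm_num)]; omega
  rw [hfd]
  set c := (if PySem.List.pyGetD tops (m:Int) 0 = 0 then (2:Int) else 3) with hc
  set L0 := List.replicate ((2*(m:Int)+2+1).toNat) (0:Int) with hL0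
  have hlen0 : (L0.length : Int) = 2*(m:Int)+3 := by
    rw [hL0, List.length_replicate]; omega
  set L1 := pySet L0 (2*(m:Int)+2) 1 with hL1
  have hlen1 : (L1.length : Int) = 2*(m:Int)+3 := by
    rw [hL1, length_pySet]; exact hlen0
  set L2 := pySet L1 (2*(m:Int)+1) c with hL2
  have hlen2 : 2*m+3 ≤ L2.length := by
    have h : L2.length = L1.length := by rw [hL2, length_pySet]
    omega
  rw [aLoop tops m L2 hlen2]
  have ge : PySem.List.pyGetD L2 (2*(m:Int)+2) 0 = 1 := by
    rw [hL2, pyGetD_pySet_ne _ _ _ _ _ (by omega) (by omega) (by omega), hL1,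
        pyGetD_pySet_self _ _ _ _ (by omega) (by omega)]
  have go : PySem.List.pyGetD L2 (2*(m:Int)+1) 0 = c := by
    rw [hL2]
    exact pyGetD_pySet_self _ _ _ _ (by omega) (by omega)
  rw [ge, go]
  -- B's boundary value equals c
  have hoc : (if PySem.List.pyGetD tops ((m:Int)+1-1) 0 ≠ 0 then (3:Int) else 2) = c := by
    rw [show ((m:Int)+1-1) = (m:Int) by ring, hc]
    by_cases ht : PySem.List.pyGetD tops (m:Int) 0 = 0
    · rw [if_neg (fun h => h ht), if_pos ht]
    · rw [if_pos ht, if_neg ht]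
  simp only [solution_alt, if_neg (by omega : ¬ (m:Int)+1 = 0)]
  rw [hoc]
  by_cases hm0 : (m:Int) + 1 - 1 = 0
  · -- n = 1: no loop on either side
    have hm : m = 0 := by omega
    subst hm
    rw [if_pos hm0]
    simp only [aRun]
    simp only [PySem.Int.mod_eq_emod_of_pos hp]
    rw [Int.emod_emod_of_dvd _ dvd_rfl]
    omega
  · rw [if_neg hm0]
    rw [show ((m:Int)+1-1) = (m:Int) by ring] at *
    have hm1 : 1 ≤ m := by omega
    rw [aRun_segRun]
    have hmain := matProd_segRun tops ((m:Int) - 0).toNat 0 (m:Int) rfl (by omega) (1, c)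
    rw [show (((m:Int) - 0).toNat) = m by omega] at hmain
    set M := matProd tops 0 (m:Int)
    set S := segRun tops 0 m (1, c)
    simp only [PySem.Int.mod_eq_emod_of_pos hp]
    rw [Int.emod_emod_of_dvd _ dvd_rfl]
    have h1 : M.1 * 1 + M.2.1 * c ≡ S.1 [ZMOD 10007] := hmain.1
    have h2 : M.2.2.1 * 1 + M.2.2.2 * c ≡ S.2 [ZMOD 10007] := hmain.2
    show S.2 + S.1 ≡ (M.1 * 1 + M.2.1 * c) + (M.2.2.1 * 1 + M.2.2.2 * c) [ZMOD 10007]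
    calc S.2 + S.1 ≡ (M.2.2.1 * 1 + M.2.2.2 * c) + (M.1 * 1 + M.2.1 * c) [ZMOD 10007] :=
          Int.ModEq.add h2.symm h1.symm
      _ = _ := by ring

theorem solution_changed : Claim_changed_solution := by
  unfold Claim_changed_solution; decide

theorem solution_tight : Claim_exact_solution := by
  unfold Claim_exact_solution
  intro n tops _ _ hd
  subst hd
  have hB : solution_alt 0 tops = 1 := by simp [solution_alt]
  rw [hB]
  simp only [solution]
  by_cases hg : PySem.List.pyGetD tops (PySem.Int.floordiv (2*(0:Int)-1) 2) 0 = 0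
  · rw [if_pos hg,
        PySem.List.pyRange_neg_one_eq_nil (by norm_num : (2*(0:Int)-2) ≤ -1)]
    simp only [List.foldl_nil]
    decide
  · rw [if_neg hg,
        PySem.List.pyRange_neg_one_eq_nil (by norm_num : (2*(0:Int)-2) ≤ -1)]
    simp only [List.foldl_nil]
    decide
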